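-- pv_equiv track=rewrite | github.com/notagadget/crisis-monitor-dashboard | kalshi.py | _dedup_similar
-- ===== SOURCE A (Python) =====
-- def _dedup_similar(markets: list, max_shared_words: int = 4) -> list:
--     """Drop near-duplicate titles, keeping higher volume first."""
--     kept = []
--     for m in markets:
--         words = set(m["title"].lower().split())
--         duplicate = any(
--             len(words & set(k["title"].lower().split())) > max_shared_words
--             for k in kept
--         )
--         if not duplicate:
--             kept.append(m)
--     return kept
-- ===== SOURCE B (Python) =====
-- def _dedup_similar(markets: list, max_shared_words: int = 4) -> list:
--     """Drop near-duplicate titles, keeping input order, via an inverted word index."""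
--     kept = []
--     index = {}  # word -> list of indices of kept markets whose title contains it
--     for m in markets:
--         words = set(m["title"].lower().split())
--         counts = {}
--         for w in words:
--             for i in index.get(w, ()):
--                 counts[i] = counts.get(i, 0) + 1
--         if not any(counts.get(i, 0) > max_shared_words for i in range(len(kept))):
--             for w in words:
--                 index.setdefault(w, []).append(len(kept))
--             kept.append(m)
--     return kept
-- ===== Notes on version B (the rewrite author's own statement) =====
-- stated objective: alternative
-- what changed: Replaces A's per-candidate rescan of every kept title (pairwise set intersections) by an inverted word-to-kept-indices index whose posting lists accumulate shared-word tallies per kept market.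
import Mathlib
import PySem

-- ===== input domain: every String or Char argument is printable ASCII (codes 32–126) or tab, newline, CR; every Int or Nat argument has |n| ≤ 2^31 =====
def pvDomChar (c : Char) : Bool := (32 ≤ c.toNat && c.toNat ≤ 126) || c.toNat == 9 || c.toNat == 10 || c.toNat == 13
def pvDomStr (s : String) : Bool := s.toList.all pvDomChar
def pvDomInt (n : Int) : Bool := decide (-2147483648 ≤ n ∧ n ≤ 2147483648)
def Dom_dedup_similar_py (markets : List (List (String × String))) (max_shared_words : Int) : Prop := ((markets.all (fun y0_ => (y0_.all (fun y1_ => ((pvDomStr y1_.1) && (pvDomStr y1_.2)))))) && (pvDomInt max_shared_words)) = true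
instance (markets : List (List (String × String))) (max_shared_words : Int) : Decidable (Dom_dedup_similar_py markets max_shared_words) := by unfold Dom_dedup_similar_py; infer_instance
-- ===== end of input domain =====

-- B replaces A's pairwise set-intersection rescan of all kept titles by an inverted
-- word→kept-indices index with per-candidate shared-word tallies (objective: alternative).

-- shared helper: set(m["title"].lower().split()) — the same expression in both Pythons
def pvWords (m : List (String × String)) : PySem.Set String :=
  PySem.Set.ofList (PySem.Str.split₀ (PySem.Str.lower ((PySem.Dict.ofList m).getD "title" "")))

-- ===== PORT A =====
def pvAStep (mx : Int) (kept : List (List (String × String))) (m : List (String × String)) :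
    List (List (String × String)) :=
  let words := pvWords m
  let duplicate := kept.any (fun k =>
    decide (mx < PySem.Set.len (PySem.Set.inter words (pvWords k))))
  if duplicate then kept else kept ++ [m]

def dedup_similar_py (markets : List (List (String × String))) (max_shared_words : Int) : List (List (String × String)) :=
  markets.foldl (pvAStep max_shared_words) []

-- ===== PORT B =====
def pvBStep (mx : Int)
    (st : List (List (String × String)) × PySem.Dict String (List Int))
    (m : List (String × String)) :
    List (List (String × String)) × PySem.Dict String (List Int) :=
  let kept := st.1
  let index := st.2
  let words := pvWords m
  let counts : PySem.Dict Int Int := words.foldl (fun c w =>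
    (index.getD w []).foldl (fun c i => c.modify i 0 (· + 1)) c) PySem.Dict.empty
  if (PySem.List.pyRange 0 (kept.length : Int) 1).any (fun i => decide (mx < counts.getD i 0)) then
    st
  else
    (kept ++ [m],
     words.foldl (fun idx w => idx.modify w [] (· ++ [(kept.length : Int)])) index)

def dedup_similar_py_alt (markets : List (List (String × String))) (max_shared_words : Int) : List (List (String × String)) :=
  (markets.foldl (pvBStep max_shared_words) ([], PySem.Dict.empty)).1

-- ===== PRECONDITION & SPEC =====
-- Pre_ excludes exactly the inputs where Python A raises KeyError: a market dict without a "title" key.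
def Pre_dedup_similar_py (markets : List (List (String × String))) (max_shared_words : Int) : Prop :=
  ∀ m ∈ markets, "title" ∈ m.map Prod.fst
instance (markets : List (List (String × String))) (max_shared_words : Int) : Decidable (Pre_dedup_similar_py markets max_shared_words) := by unfold Pre_dedup_similar_py; infer_instance

def pvWitness_dedup_similar_py : (List (List (String × String))) × Int :=
  ([[("title", "big cat runs")], [("title", "big cat sits")], [("title", "dog")]], 1)

def Spec_dedup_similar_py (markets : List (List (String × String))) (max_shared_words : Int) (out : List (List (String × String))) : Prop := out = dedup_similar_py_alt markets max_shared_words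
instance (markets : List (List (String × String))) (max_shared_words : Int) (out : List (List (String × String))) : Decidable (Spec_dedup_similar_py markets max_shared_words out) := by unfold Spec_dedup_similar_py; infer_instance

-- ===== CLAIM (what is proved, stated in full; the proofs are below) =====
def Claim_equal_dedup_similar_py : Prop := ∀ (markets : List (List (String × String))) (max_shared_words : Int), Dom_dedup_similar_py markets max_shared_words → Pre_dedup_similar_py markets max_shared_words → Spec_dedup_similar_py markets max_shared_words (dedup_similar_py markets max_shared_words)

-- ===== LEMMAS AND PROOFS =====

-- invariant: the posting list of a word w is exactly the (increasing) list of kept indices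
-- whose word set contains w
def pvInv (kept : List (List (String × String))) (index : PySem.Dict String (List Int)) : Prop :=
  ∀ w, index.getD w [] =
    ((List.range kept.length).filter (fun n => (pvWords (kept.getD n [])).contains w)).map
      (fun n : Nat => (n : Int))

lemma pv_counts_getD (index : PySem.Dict String (List Int)) (ws : List String)
    (c0 : PySem.Dict Int Int) (i : Int) :
    (ws.foldl (fun c w => (index.getD w []).foldl (fun c j => c.modify j 0 (· + 1)) c) c0).getD i 0
      = c0.getD i 0 + (ws.map (fun w => ((index.getD w []).count i : Int))).sum := by
  induction ws generalizing c0 with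
  | nil => simp
  | cons w ws ih =>
    simp only [List.foldl_cons, ih, PySem.Dict.getD_foldl_modify_add_one, List.map_cons,
      List.sum_cons]
    ring

lemma pv_count_posting (kept : List (List (String × String))) (index : PySem.Dict String (List Int))
    (h : pvInv kept index) (w : String) (n : Nat) (hn : n < kept.length) :
    ((index.getD w []).count ((n : Int)) : Int)
      = if (pvWords (kept.getD n [])).contains w then 1 else 0 := by
  rw [h w]
  rw [List.count_map_of_injective _ _ (fun a b hab => by exact_mod_cast hab)]
  have hnd : ((List.range kept.length).filter
      (fun n => (pvWords (kept.getD n [])).contains w)).Nodup :=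
    (List.nodup_range).filter _
  by_cases hmem : (pvWords (kept.getD n [])).contains w = true
  · have hmm : n ∈ (List.range kept.length).filter
        (fun n => (pvWords (kept.getD n [])).contains w) :=
      List.mem_filter.mpr ⟨List.mem_range.mpr hn, hmem⟩
    rw [List.count_eq_one_of_mem hnd hmm, if_pos hmem]
    rfl
  · have hmm : n ∉ (List.range kept.length).filter
        (fun n => (pvWords (kept.getD n [])).contains w) :=
      fun hc => hmem (List.mem_filter.mp hc).2
    rw [List.count_eq_zero_of_not_mem hmm, if_neg hmem]
    rfl

lemma pv_sum_ite (t : PySem.Set String) (l : List String) :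
    (l.map (fun w => if t.contains w then (1 : Int) else 0)).sum
      = ((l.filter (fun w => t.contains w)).length : Int) := by
  induction l with
  | nil => simp
  | cons a l ihl =>
    rw [List.map_cons, List.sum_cons, List.filter_cons, ihl]
    by_cases ha : t.contains a = true
    · rw [if_pos ha, if_pos ha, List.length_cons]
      push_cast
      ring
    · rw [if_neg ha, if_neg ha, zero_add]

lemma pv_cond_eq (mx : Int) (kept : List (List (String × String)))
    (index : PySem.Dict String (List Int)) (h : pvInv kept index) (m : List (String × String)) :
    ((PySem.List.pyRange 0 (kept.length : Int) 1).any (fun i =>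
        decide (mx < ((pvWords m).foldl (fun c w =>
          (index.getD w []).foldl (fun c j => c.modify j 0 (· + 1)) c)
            PySem.Dict.empty).getD i 0)))
      = kept.any (fun k => decide (mx < PySem.Set.len (PySem.Set.inter (pvWords m) (pvWords k)))) := by
  have key : ∀ n : Nat, n < kept.length →
      ((pvWords m).foldl (fun c w =>
        (index.getD w []).foldl (fun c j => c.modify j 0 (· + 1)) c)
          PySem.Dict.empty).getD (n : Int) 0
        = PySem.Set.len (PySem.Set.inter (pvWords m) (pvWords (kept.getD n []))) := by
    intro n hn
    rw [pv_counts_getD]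
    have hfun : (fun w => (((index.getD w []).count ((n : Int)) : Int)))
        = fun w => if (pvWords (kept.getD n [])).contains w then (1 : Int) else 0 :=
      funext (fun w => pv_count_posting kept index h w n hn)
    rw [hfun, pv_sum_ite]
    simp only [PySem.Set.len, PySem.Set.inter, PySem.Dict.getD_empty, zero_add]
  apply Bool.eq_iff_iff.mpr
  simp only [List.any_eq_true, decide_eq_true_eq, PySem.List.mem_pyRange_one]
  constructor
  · rintro ⟨i, ⟨h0, hi⟩, hlt⟩
    lift i to Nat using h0 with n
    have hn : n < kept.length := by exact_mod_cast hi
    refine ⟨kept.getD n [], ?_, ?_⟩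
    · rw [List.getD_eq_getElem _ _ hn]; exact List.getElem_mem hn
    · rw [key n hn] at hlt; exact hlt
  · rintro ⟨k, hk, hlt⟩
    obtain ⟨n, hn, rfl⟩ := List.mem_iff_getElem.mp hk
    refine ⟨(n : Int), ⟨Int.natCast_nonneg n, by exact_mod_cast hn⟩, ?_⟩
    rw [key n hn, List.getD_eq_getElem _ _ hn]
    exact hlt

lemma pv_filter_beq_of_nodup {α : Type} [BEq α] [LawfulBEq α] (xs : List α) (h : xs.Nodup) (w : α) :
    xs.filter (fun u => u == w) = if w ∈ xs then [w] else [] := by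
  induction xs with
  | nil => simp
  | cons a l ih =>
    simp only [List.nodup_cons] at h
    by_cases haw : a = w
    · subst haw
      have : l.filter (fun u => u == a) = [] :=
        List.filter_eq_nil_iff.mpr (fun u hu => by simp; rintro rfl; exact h.1 hu)
      simp [this]
    · have hwl : (w ∈ a :: l) = (w ∈ l) := by
        simp only [List.mem_cons, eq_iff_iff]
        constructor
        · rintro (rfl | hh)
          · exact absurd rfl haw
          · exact hh
        · exact Or.inr
      simp [haw, ih h.2, hwl]

lemma pv_inv_keep (kept : List (List (String × String))) (index : PySem.Dict String (List Int))
    (h : pvInv kept index) (m : List (String × String)) :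
    pvInv (kept ++ [m])
      ((pvWords m).foldl (fun idx w => idx.modify w [] (· ++ [(kept.length : Int)])) index) := by
  intro w
  have hfold : (pvWords m).foldl (fun idx w => idx.modify w [] (· ++ [(kept.length : Int)])) index
      = ((pvWords m).map (fun w => (w, (kept.length : Int)))).foldl
          (fun d p => d.modify p.1 [] (· ++ [p.2])) index := by
    rw [List.foldl_map]
  rw [hfold, PySem.Dict.getD_foldl_modify_append, h w]
  have hnodup : (pvWords m : List String).Nodup := by
    unfold pvWords; exact PySem.Set.nodup_ofList _
  have hfilter : (((pvWords m).map (fun u => (u, (kept.length : Int)))).filter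
      (fun p => p.1 == w)).map (fun x => x.2)
      = if (pvWords m).contains w then [(kept.length : Int)] else [] := by
    rw [List.filter_map, List.map_map]
    have heq : ((pvWords m).filter ((fun p => p.1 == w) ∘ fun u => (u, (kept.length : Int))))
        = (pvWords m).filter (fun u => u == w) := by
      apply List.filter_congr; intro u _; rfl
    rw [heq, pv_filter_beq_of_nodup (pvWords m) hnodup w]
    by_cases hw : w ∈ (pvWords m : List String) <;> simp [hw]
  rw [hfilter]
  have hlen : (kept ++ [m]).length = kept.length + 1 := by simp
  rw [hlen, List.range_succ, List.filter_append, List.map_append]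
  have hm : (kept ++ [m]).getD kept.length [] = m := by
    rw [List.getD_eq_getElem _ _ (by simp)]
    simp
  have h1 : List.filter (fun n => (pvWords ((kept ++ [m]).getD n [])).contains w)
        (List.range kept.length)
      = List.filter (fun n => (pvWords (kept.getD n [])).contains w) (List.range kept.length) := by
    apply List.filter_congr
    intro n hn
    have hn' : n < kept.length := List.mem_range.mp hn
    rw [List.getD_eq_getElem _ _ (by simp; omega),
      List.getD_eq_getElem _ _ hn', List.getElem_append_left hn']
  have h2 : List.filter (fun n => (pvWords ((kept ++ [m]).getD n [])).contains w) [kept.length]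
      = if (pvWords m).contains w then [kept.length] else [] := by
    rw [List.filter_cons, List.filter_nil, hm]
  rw [h1, h2]
  by_cases hw : (pvWords m).contains w = true
  · rw [if_pos hw, if_pos hw]
    simp
  · rw [if_neg hw, if_neg hw]
    simp

lemma pv_main_loop (mx : Int) (markets : List (List (String × String)))
    (kept : List (List (String × String))) (index : PySem.Dict String (List Int))
    (h : pvInv kept index) :
    (markets.foldl (pvBStep mx) (kept, index)).1 = markets.foldl (pvAStep mx) kept := by
  induction markets generalizing kept index with
  | nil => rfl
  | cons m rest ih =>
    simp only [List.foldl_cons]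
    have hc := pv_cond_eq mx kept index h m
    by_cases hdup : kept.any (fun k =>
        decide (mx < PySem.Set.len (PySem.Set.inter (pvWords m) (pvWords k)))) = true
    · have hB : pvBStep mx (kept, index) m = (kept, index) := by
        simp only [pvBStep]; rw [hc, hdup]; simp
      have hA : pvAStep mx kept m = kept := by
        simp only [pvAStep]; rw [hdup]; simp
      rw [hB, hA]; exact ih kept index h
    · have hdup' := Bool.eq_false_iff.mpr hdup
      have hB : pvBStep mx (kept, index) m = (kept ++ [m],
          (pvWords m).foldl (fun idx w => idx.modify w [] (· ++ [(kept.length : Int)])) index) := by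
        simp only [pvBStep]; rw [hc, hdup']; simp
      have hA : pvAStep mx kept m = kept ++ [m] := by
        simp only [pvAStep]; rw [hdup']; simp
      rw [hB, hA]
      exact ih _ _ (pv_inv_keep kept index h m)

lemma pv_inv_init : pvInv [] PySem.Dict.empty := by
  intro w; simp [PySem.Dict.getD_empty]

-- ===== VERDICT (by name: the statement is the Claim_ definition above) =====
theorem dedup_similar_py_spec : Claim_equal_dedup_similar_py := by
  intro markets mx _ _
  unfold Spec_dedup_similar_py dedup_similar_py dedup_similar_py_alt
  rw [pv_main_loop mx markets [] PySem.Dict.empty pv_inv_init]
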